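-- pv_equiv track=rewrite | github.com/RainbowRedux/RainbowSixFileConverters | RainbowFileReaders/BinaryConversionUtilities.py | calc_bitmasks_ARGB_color
-- ===== SOURCE A (Python) =====
-- previousMasks = {}
--
-- def calc_bitmasks_ARGB_color(bdR, bdG, bdB, bdA):
--     key = str(bdA) + str(bdR) + str(bdG) + str(bdB)
--     if key in previousMasks:
--         masks = previousMasks[key]
--         return masks
--
--     redMask = 0
--     greenMask = 0
--     blueMask = 0
--     alphaMask = 0
--
--     if bdA > 0:
--         for _ in range(bdA):
--             alphaMask = (alphaMask << 1) + 1
--         alphaMask = alphaMask << (bdR + bdG + bdB)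
--
--     for _ in range(bdR):
--         redMask = (redMask << 1) + 1
--     redMask = redMask << (bdG + bdB)
--
--     greenMask = 0
--     for _ in range(bdG):
--         greenMask = (greenMask << 1) + 1
--     greenMask = greenMask << (bdB)
--
--     blueMask = 0
--     for _ in range(bdB):
--         blueMask = (blueMask << 1) + 1
--
--     masks = [redMask, greenMask, blueMask, alphaMask]
--     previousMasks[key] = masks
--     return masks
-- ===== SOURCE B (Python) =====
-- def calc_bitmasks_ARGB_color(bdR, bdG, bdB, bdA):
--     def mask(bits, shift):
--         return ((1 << bits) - 1) << shift if bits > 0 else 0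
--     return [mask(bdR, bdG + bdB), mask(bdG, bdB), mask(bdB, 0),
--             mask(bdA, bdR + bdG + bdB)]
-- ===== Notes on version B (the rewrite author's own statement) =====
-- stated objective: simpler
-- what changed: Replaces each per-bit accumulation loop (and the module-level string-keyed memo cache, whose concatenated key can collide) with one closed-form helper mask(bits, shift) = ((1<<bits)-1)<<shift guarded by bits>0; return value is identical on every input where A returns, equivalence is about the return value only (B keeps no cache).
import Mathlib
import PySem

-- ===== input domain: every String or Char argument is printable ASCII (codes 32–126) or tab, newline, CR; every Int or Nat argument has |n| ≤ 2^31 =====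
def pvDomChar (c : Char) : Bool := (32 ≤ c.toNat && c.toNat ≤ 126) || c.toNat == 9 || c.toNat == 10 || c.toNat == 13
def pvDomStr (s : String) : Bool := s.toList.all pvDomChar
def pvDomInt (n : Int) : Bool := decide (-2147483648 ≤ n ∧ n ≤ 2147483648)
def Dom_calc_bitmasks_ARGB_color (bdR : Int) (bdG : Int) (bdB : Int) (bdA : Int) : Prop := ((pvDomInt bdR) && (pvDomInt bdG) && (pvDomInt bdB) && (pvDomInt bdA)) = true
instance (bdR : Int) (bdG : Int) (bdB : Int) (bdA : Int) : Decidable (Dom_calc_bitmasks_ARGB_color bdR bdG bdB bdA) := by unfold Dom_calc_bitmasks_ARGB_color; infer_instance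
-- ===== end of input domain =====

-- B replaces A's per-bit accumulation loops with a closed-form per-channel mask helper (simpler);
-- A's module-level memo dict is a side effect on a global, not modelled: the equivalence is about the return value only.

-- ===== PORT A =====
-- Each 'for _ in range(bd): m = (m << 1) + 1' loop is a foldl over pyRange; Python's 'x << n'
-- is ported as x * 2 ^ n.toNat, exact for n ≥ 0 (Python raises on n < 0: excluded by Pre_).
def calc_bitmasks_ARGB_color (bdR : Int) (bdG : Int) (bdB : Int) (bdA : Int) : List Int :=
  let alphaMask : Int :=
    if bdA > 0 then
      ((PySem.List.pyRange 0 bdA 1).foldl (fun m _ => m * 2 + 1) 0) * 2 ^ (bdR + bdG + bdB).toNat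
    else 0
  let redMask : Int :=
    ((PySem.List.pyRange 0 bdR 1).foldl (fun m _ => m * 2 + 1) 0) * 2 ^ (bdG + bdB).toNat
  let greenMask : Int :=
    ((PySem.List.pyRange 0 bdG 1).foldl (fun m _ => m * 2 + 1) 0) * 2 ^ bdB.toNat
  let blueMask : Int :=
    (PySem.List.pyRange 0 bdB 1).foldl (fun m _ => m * 2 + 1) 0
  [redMask, greenMask, blueMask, alphaMask]

-- ===== PORT B =====
-- Source B's mask(bits, shift) = ((1 << bits) - 1) << shift if bits > 0 else 0
def pvMask (bits : Int) (shift : Int) : Int :=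
  if bits > 0 then (2 ^ bits.toNat - 1) * 2 ^ shift.toNat else 0

def calc_bitmasks_ARGB_color_alt (bdR : Int) (bdG : Int) (bdB : Int) (bdA : Int) : List Int :=
  [pvMask bdR (bdG + bdB), pvMask bdG bdB, pvMask bdB 0, pvMask bdA (bdR + bdG + bdB)]

-- ===== PRECONDITION & SPEC =====
-- Pre_ excludes exactly the inputs where Python A raises ValueError ('negative shift count'):
-- a negative shift in 'greenMask << bdB', 'redMask << (bdG+bdB)', or (when bdA > 0) the alpha shift.
def Pre_calc_bitmasks_ARGB_color (bdR : Int) (bdG : Int) (bdB : Int) (bdA : Int) : Prop :=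
  0 ≤ bdB ∧ 0 ≤ bdG + bdB ∧ (0 < bdA → 0 ≤ bdR + bdG + bdB)
instance (bdR : Int) (bdG : Int) (bdB : Int) (bdA : Int) : Decidable (Pre_calc_bitmasks_ARGB_color bdR bdG bdB bdA) := by unfold Pre_calc_bitmasks_ARGB_color; infer_instance

def pvWitness_calc_bitmasks_ARGB_color : Int × Int × Int × Int := (8, 8, 8, 8)

def Spec_calc_bitmasks_ARGB_color (bdR : Int) (bdG : Int) (bdB : Int) (bdA : Int) (out : List Int) : Prop := out = calc_bitmasks_ARGB_color_alt bdR bdG bdB bdA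
instance (bdR : Int) (bdG : Int) (bdB : Int) (bdA : Int) (out : List Int) : Decidable (Spec_calc_bitmasks_ARGB_color bdR bdG bdB bdA out) := by unfold Spec_calc_bitmasks_ARGB_color; infer_instance

-- ===== CLAIM (what is proved, stated in full; the proofs are below) =====
def Claim_equal_calc_bitmasks_ARGB_color : Prop := ∀ (bdR : Int) (bdG : Int) (bdB : Int) (bdA : Int), Dom_calc_bitmasks_ARGB_color bdR bdG bdB bdA → Pre_calc_bitmasks_ARGB_color bdR bdG bdB bdA → Spec_calc_bitmasks_ARGB_color bdR bdG bdB bdA (calc_bitmasks_ARGB_color bdR bdG bdB bdA)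

-- ===== LEMMAS AND PROOFS =====
-- The ones-accumulating loop in closed form.
theorem foldl_ones {α : Type} (l : List α) (init : Int) :
    l.foldl (fun m _ => m * 2 + 1) init = (init + 1) * 2 ^ l.length - 1 := by
  induction l generalizing init with
  | nil => simp
  | cons a t ih => simp [List.foldl_cons, ih, pow_succ]; ring

-- Each channel of A equals B's closed-form mask, unconditionally.
theorem chan_eq (bd shift : Int) :
    ((PySem.List.pyRange 0 bd 1).foldl (fun m _ => m * 2 + 1) 0) * 2 ^ shift.toNat
      = pvMask bd shift := by
  rw [foldl_ones, PySem.List.length_pyRange_one, pvMask]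
  rw [show (bd - 0).toNat = bd.toNat by omega]
  rcases le_or_gt bd 0 with h | h
  · rw [show bd.toNat = 0 by omega]
    simp [not_lt.mpr h]
  · simp [h]

-- ===== VERDICT (by name: the statement is the Claim_ definition above) =====
theorem calc_bitmasks_ARGB_color_spec : Claim_equal_calc_bitmasks_ARGB_color := by
  intro bdR bdG bdB bdA _ _
  unfold Spec_calc_bitmasks_ARGB_color calc_bitmasks_ARGB_color calc_bitmasks_ARGB_color_alt
  have hblue := chan_eq bdB 0
  simp only [Int.toNat_zero, pow_zero, mul_one] at hblue
  rcases le_or_gt bdA 0 with hA | hA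
  · simp [not_lt.mpr hA, chan_eq, hblue, pvMask]
  · simp [hA, chan_eq, hblue]
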